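-- pv_equiv track=rewrite | github.com/fortable1999/dynamicprogramming | Tape.py | solution
-- ===== SOURCE A (Python) =====
-- def solution(A):
--     # write your code in Python 3.6
--     left, right = A[0], sum(A[1:])
--     diff = abs(left - right)
--
--     for elem in A[1:-1]:
--         left += elem
--         right -= elem
--         if abs(left - right) < diff:
--             diff = abs(left - right)
--
--     return diff
-- ===== SOURCE B (Python) =====
-- def solution(A):
--     # Suffix sums built back-to-front, candidate diffs as a comprehension, minimum by sorting.
--     suf = []
--     s = 0
--     for x in reversed(A):
--         s += x
--         suf.append(s)
--     suf.reverse()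
--     total = suf[0] if suf else 0
--     cands = [abs(total - 2 * r) for r in suf[1:]]
--     return sorted(cands)[0] if cands else abs(A[0])
-- ===== Notes on version B (the rewrite author's own statement) =====
-- stated objective: alternative
-- what changed: B traverses the array back-to-front building a suffix-sum list, forms all split differences as a comprehension abs(total - 2*suffix), and selects the minimum by sorting, instead of A's forward pass with left/right accumulators and an in-loop running minimum.
import Mathlib
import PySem

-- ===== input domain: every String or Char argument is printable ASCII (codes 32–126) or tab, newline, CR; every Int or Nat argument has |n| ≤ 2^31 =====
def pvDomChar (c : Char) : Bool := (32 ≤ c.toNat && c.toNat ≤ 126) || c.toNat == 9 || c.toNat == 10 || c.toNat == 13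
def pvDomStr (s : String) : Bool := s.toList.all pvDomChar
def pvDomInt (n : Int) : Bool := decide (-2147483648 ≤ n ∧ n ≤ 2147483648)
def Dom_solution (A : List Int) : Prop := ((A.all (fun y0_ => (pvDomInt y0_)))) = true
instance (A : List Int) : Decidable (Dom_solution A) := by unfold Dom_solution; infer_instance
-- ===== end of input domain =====

-- B builds a suffix-sum list back-to-front, forms every split difference, and selects the minimum by sorting,
-- replacing A's forward pass with left/right accumulators and an in-loop running minimum (alternative algorithm, not faster).

-- ===== PORT A =====
-- the body of A's for-loop, named (state = (left, right, diff))
def solStep (st : Int × Int × Int) (elem : Int) : Int × Int × Int :=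
  let l := st.1 + elem
  let r := st.2.1 - elem
  (l, r, if |l - r| < st.2.2 then |l - r| else st.2.2)

def solution (A : List Int) : Int :=
  let left := (PySem.List.pyGet? A 0).getD 0   -- A[0]; none (IndexError on []) excluded by Pre_
  let right := (PySem.List.slice A (some 1) none).sum
  let diff := |left - right|
  ((PySem.List.slice A (some 1) (some (-1))).foldl solStep (left, right, diff)).2.2

-- ===== PORT B =====
def solution_alt (A : List Int) : Int :=
  -- for x in reversed(A): s += x; suf.append(s); then suf.reverse()
  let suf := ((A.reverse).foldl (fun (ac : List Int × Int) x =>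
      (ac.1 ++ [ac.2 + x], ac.2 + x)) ([], 0)).1.reverse
  let total := (PySem.List.pyGet? suf 0).getD 0          -- suf[0] if suf else 0
  let cands := (PySem.List.slice suf (some 1) none).map (fun r => |total - 2 * r|)
  if cands ≠ [] then (PySem.List.sorted cands (fun y => y) false).headD 0   -- sorted(cands)[0], cands nonempty
  else |(PySem.List.pyGet? A 0).getD 0|                  -- abs(A[0]); [] excluded by Pre_

-- ===== PRECONDITION & SPEC =====
-- Pre_ excludes only the empty list, on which A's A[0] raises IndexError.
def Pre_solution (A : List Int) : Prop := A ≠ []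
instance (A : List Int) : Decidable (Pre_solution A) := by unfold Pre_solution; infer_instance

def pvWitness_solution : List Int := [3, 1, 2]

def Spec_solution (A : List Int) (out : Int) : Prop := out = solution_alt A
instance (A : List Int) (out : Int) : Decidable (Spec_solution A out) := by unfold Spec_solution; infer_instance

-- ===== CLAIM (what is proved, stated in full; the proofs are below) =====
def Claim_equal_solution : Prop := ∀ (A : List Int), Dom_solution A → Pre_solution A → Spec_solution A (solution A)

-- ===== LEMMAS AND PROOFS =====

-- running prefix sums starting from s (proof-only helper)
def prefs (s : Int) : List Int → List Int
  | [] => []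
  | x :: t => (s + x) :: prefs (s + x) t

theorem prefs_ne_nil (s x : Int) (t : List Int) : prefs s (x :: t) ≠ [] := by
  simp [prefs]

theorem prefs_dropLast (s : Int) (xs : List Int) :
    (prefs s xs).dropLast = prefs s xs.dropLast := by
  induction xs generalizing s with
  | nil => simp [prefs]
  | cons x t ih =>
    cases t with
    | nil => simp [prefs]
    | cons y u =>
      have e1 : prefs s (x :: y :: u) = (s + x) :: prefs (s + x) (y :: u) := rfl
      have e2 : (x :: y :: u).dropLast = x :: (y :: u).dropLast := rfl
      rw [e1, List.dropLast_cons_of_ne_nil (prefs_ne_nil (s + x) y u), ih, e2]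
      rfl

theorem prefs_shift (xs : List Int) (s c : Int) :
    prefs (s + c) xs = (prefs s xs).map (fun p => p + c) := by
  induction xs generalizing s with
  | nil => simp [prefs]
  | cons x t ih =>
    simp only [prefs, List.map_cons]
    rw [show s + c + x = (s + x) + c by ring, ih]

theorem prefs_append_singleton (s y : Int) (xs : List Int) :
    prefs s (xs ++ [y]) = prefs s xs ++ [s + xs.sum + y] := by
  induction xs generalizing s with
  | nil => simp [prefs]
  | cons x t ih =>
    simp only [List.cons_append, prefs, ih, List.sum_cons]
    rw [show s + (x + t.sum) + y = s + x + t.sum + y by ring]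

theorem presFold (xs : List Int) (acc : List Int) (s : Int) :
    (xs.foldl (fun (ac : List Int × Int) x => (ac.1 ++ [ac.2 + x], ac.2 + x)) (acc, s)).1
      = acc ++ prefs s xs := by
  induction xs generalizing acc s with
  | nil => simp [prefs]
  | cons x t ih => simp [prefs, ih]

-- the suffix-sum list of a nonempty list, in terms of its proper prefix sums
theorem suf_eq (l : List Int) (h : l ≠ []) :
    (prefs 0 l.reverse).reverse
      = l.sum :: ((prefs 0 l).dropLast).map (fun p => l.sum - p) := by
  induction l with
  | nil => exact absurd rfl h
  | cons x t ih =>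
    cases t with
    | nil => simp [prefs]
    | cons y u =>
      have ht : (y :: u) ≠ [] := by simp
      have hs : (y :: u).reverse.sum = (y :: u).sum := List.sum_reverse (y :: u)
      rw [List.reverse_cons, prefs_append_singleton, List.reverse_append, hs]
      simp only [List.reverse_singleton, List.singleton_append]
      rw [ih ht]
      have e1 : prefs 0 (x :: y :: u) = (0 + x) :: prefs (0 + x) (y :: u) := rfl
      have hx0 : (0 : Int) + x = x := by ring
      rw [e1, hx0, List.dropLast_cons_of_ne_nil (prefs_ne_nil x y u), List.map_cons]
      have hshift : prefs x (y :: u) = (prefs 0 (y :: u)).map (fun p => p + x) := by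
        have := prefs_shift (y :: u) 0 x
        rwa [zero_add] at this
      have hdl : (prefs x (y :: u)).dropLast
          = ((prefs 0 (y :: u)).dropLast).map (fun p => p + x) := by
        rw [hshift]
        exact List.map_dropLast.symm
      simp only [List.cons.injEq, List.sum_cons]
      refine ⟨by ring, by ring, ?_⟩
      rw [hdl, List.map_map]
      apply List.map_congr_left
      intro p _
      simp only [Function.comp_apply]
      ring

-- A's loop equals a fold of min over the mapped prefix sums
theorem loopA (xs : List Int) (l r d : Int) :
    (xs.foldl solStep (l, r, d)).2.2
      = ((prefs l xs).map (fun p => |2 * p - (l + r)|)).foldl min d := by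
  induction xs generalizing l r d with
  | nil => simp [prefs]
  | cons e t ih =>
    have hsum : (l + e) + (r - e) = l + r := by ring
    have habs : |l + e - (r - e)| = |2 * (l + e) - (l + r)| := by ring_nf
    have hmin : (if |l + e - (r - e)| < d then |l + e - (r - e)| else d)
        = min d |2 * (l + e) - (l + r)| := by
      rw [habs]; omega
    simp only [List.foldl_cons, solStep, prefs, List.map_cons]
    rw [ih, hsum, hmin]

theorem slice_one_neg_one (a : Int) (rest : List Int) :
    PySem.List.slice (a :: rest) (some 1) (some (-1)) = rest.dropLast := by
  cases rest with
  | nil => rfl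
  | cons y u =>
    have h1 : PySem.List.clampIdx (a :: y :: u).length 1 = 1 := by
      simp [PySem.List.clampIdx]
    have h2 : PySem.List.clampIdx (a :: y :: u).length (-1) = u.length + 1 := by
      simp [PySem.List.clampIdx]; omega
    simp only [PySem.List.slice, h1, h2, List.drop_succ_cons, List.drop_zero]
    rw [List.dropLast_eq_take]
    simp

-- head of the sorted list is the running minimum
theorem sorted_headD_eq_foldl_min (x : Int) (t : List Int) :
    (PySem.List.sorted (x :: t) (fun y => y) false).headD 0 = t.foldl min x := by
  have hne : PySem.List.sorted (x :: t) (fun y => y) false ≠ [] := by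
    rw [Ne, PySem.List.sorted_eq_nil_iff]; simp
  obtain ⟨m, s', hms⟩ := List.exists_cons_of_ne_nil hne
  have hle : ∀ y ∈ (x :: t), m ≤ y := PySem.List.key_head_sorted_le _ _ hms
  have hmem : m ∈ (x :: t) := by
    have : m ∈ PySem.List.sorted (x :: t) (fun y => y) false := by simp [hms]
    exact (PySem.List.mem_sorted _ _ _ _).1 this
  have hf := PySem.List.foldl_min_le t x
  have hfm : t.foldl min x ∈ (x :: t) := by
    rcases PySem.List.foldl_min_mem t x with h | h
    · simp [h]
    · simp [h]
  rw [hms]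
  simp only [List.headD_cons]
  exact le_antisymm (hle _ hfm)
    (by rcases List.mem_cons.1 hmem with h | h
        · exact h ▸ hf.1
        · exact hf.2 _ h)

-- ===== VERDICT (by name: the statement is the Claim_ definition above) =====
theorem solution_spec : Claim_equal_solution := by
  intro A _ hP
  unfold Spec_solution
  obtain ⟨a, rest, rfl⟩ : ∃ a rest, A = a :: rest := by
    cases A with
    | nil => exact absurd rfl hP
    | cons a rest => exact ⟨a, rest, rfl⟩
  have hsuf : (((a :: rest).reverse).foldl (fun (ac : List Int × Int) x =>
      (ac.1 ++ [ac.2 + x], ac.2 + x)) ([], 0)).1.reverse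
      = (a + rest.sum) :: ((prefs 0 (a :: rest)).dropLast).map
          (fun p => (a + rest.sum) - p) := by
    rw [presFold, List.nil_append, suf_eq (a :: rest) (by simp)]
    simp
  have hA : solution (a :: rest)
      = ((prefs a rest.dropLast).map (fun p => |2 * p - (a + rest.sum)|)).foldl min
          |a - rest.sum| := by
    simp only [solution, PySem.List.pyGet?_zero_cons, Option.getD_some,
      PySem.List.slice_from_one, List.tail_cons, slice_one_neg_one]
    exact loopA _ _ _ _
  rw [hA]
  cases rest with
  | nil =>
    simp [solution_alt, prefs, PySem.List.slice_from_one]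
  | cons y u =>
    set T : Int := a + (y :: u).sum with hT
    have hdl : (prefs 0 (a :: y :: u)).dropLast = a :: prefs a (y :: u).dropLast := by
      have e1 : prefs 0 (a :: y :: u) = (0 + a) :: prefs (0 + a) (y :: u) := rfl
      rw [e1, zero_add, List.dropLast_cons_of_ne_nil (prefs_ne_nil a y u), prefs_dropLast]
    simp only [solution_alt]
    rw [hsuf]
    simp only [PySem.List.pyGet?_zero_cons, Option.getD_some, PySem.List.slice_from_one,
      List.tail_cons]
    rw [hdl]
    have hC : ((List.map (fun p => T - p) (a :: prefs a (y :: u).dropLast)).map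
          (fun r => |T - 2 * r|))
        = |2 * a - T| :: (prefs a (y :: u).dropLast).map (fun p => |2 * p - T|) := by
      simp only [List.map_cons, List.cons.injEq]
      refine ⟨by congr 1; ring, ?_⟩
      rw [List.map_map]
      apply List.map_congr_left
      intro p _
      simp only [Function.comp_apply]
      congr 1
      ring
    rw [hC]
    have hne : (|2 * a - T| :: (prefs a (y :: u).dropLast).map (fun p => |2 * p - T|)) ≠ [] := by
      simp
    rw [if_pos hne, sorted_headD_eq_foldl_min]
    have hfa : |2 * a - T| = |a - (y :: u).sum| := by rw [hT]; congr 1; ring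
    rw [hfa]
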